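-- pv_equiv track=rewrite | github.com/pmctosh/amplifier-ui | backend/open_webui/routers/amplifier.py | _extract_holmes_section
-- ===== SOURCE A (Python) =====
-- def _extract_holmes_section(content: str) -> str | None:
--     """Pull out the Holmes dossier block from the daily note if present."""
--     if not content:
--         return None
--     markers = ["HOLMES DAILY DOSSIER", "## Holmes", "Holmes Daily"]
--     for marker in markers:
--         idx = content.find(marker)
--         if idx != -1:
--             # Take from the marker to the next major section (--- or ##)
--             chunk = content[idx:]
--             end = len(chunk)
--             for delimiter in ["\n\n---", "\n## ", "\n# "]:
--                 pos = chunk.find(delimiter, 100)  # skip first 100 chars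
--                 if pos != -1 and pos < end:
--                     end = pos
--             return chunk[:end].strip()
--     return None
-- ===== SOURCE B (Python) =====
-- def _extract_holmes_section(content: str) -> str | None:
--     """Pull out the Holmes dossier block from the daily note if present."""
--     delimiters = ("\n\n---", "\n## ", "\n# ")
--     for marker in ("HOLMES DAILY DOSSIER", "## Holmes", "Holmes Daily"):
--         idx = content.find(marker)
--         if idx != -1:
--             chunk = content[idx:]
--             # single forward scan: first position >= 100 where any delimiter starts
--             end = next((j for j in range(100, len(chunk))
--                         if chunk.startswith(delimiters, j)),
--                        len(chunk))
--             return chunk[:end].strip()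
--     return None
-- ===== Notes on version B (the rewrite author's own statement) =====
-- stated objective: alternative
-- what changed: The end-of-section search is a single forward scan for the first position >= 100 where any of the three delimiters starts (Python: one next() over a generator with a tuple startswith), replacing A's three separate find passes combined by a running minimum.
import Mathlib
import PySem

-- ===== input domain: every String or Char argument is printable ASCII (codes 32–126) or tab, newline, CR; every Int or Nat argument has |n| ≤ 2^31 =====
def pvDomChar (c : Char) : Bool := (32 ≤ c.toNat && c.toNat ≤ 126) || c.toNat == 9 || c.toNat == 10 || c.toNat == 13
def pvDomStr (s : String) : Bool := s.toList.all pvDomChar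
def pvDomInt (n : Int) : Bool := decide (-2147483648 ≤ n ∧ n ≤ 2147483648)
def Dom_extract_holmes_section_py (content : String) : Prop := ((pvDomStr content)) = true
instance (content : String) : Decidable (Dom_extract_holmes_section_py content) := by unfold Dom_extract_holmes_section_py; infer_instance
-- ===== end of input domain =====

-- B replaces A's three-pass running-minimum delimiter search by a single forward scan for the
-- first position ≥ 100 where any delimiter starts (objective: alternative, same asymptotic cost).


-- ===== PORT A =====
def pvMarkers : List String := ["HOLMES DAILY DOSSIER", "## Holmes", "Holmes Daily"]
def pvDelims : List String := ["\n\n---", "\n## ", "\n# "]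

-- inner body of A: end = len(chunk); for delimiter in [...]: pos = chunk.find(delimiter, 100);
-- if pos != -1 and pos < end: end = pos;  return chunk[:end].strip()
def pvAInner (chunk : String) : String :=
  let e := pvDelims.foldl (fun e d =>
      let pos := PySem.Str.findFrom chunk d 100
      if pos ≠ -1 ∧ pos < e then pos else e) (PySem.Str.len chunk)
  PySem.Str.strip (PySem.Str.slice chunk none (some e))

def pvALoop (content : String) : List String → Option String
  | [] => none
  | m :: rest =>
    let idx := PySem.Str.find content m
    if idx ≠ -1 then
      some (pvAInner (PySem.Str.slice content (some idx) none))
    else pvALoop content rest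

def extract_holmes_section_py (content : String) : Option String :=
  if content = "" then none
  else pvALoop content pvMarkers

-- ===== PORT B =====
-- chunk.startswith(("\n\n---", "\n## ", "\n# "), j)
def pvStartsAny (cs : List Char) (j : Nat) : Bool :=
  PySem.Chars.startswith (cs.drop j) "\n\n---".toList ||
  PySem.Chars.startswith (cs.drop j) "\n## ".toList ||
  PySem.Chars.startswith (cs.drop j) "\n# ".toList

-- next((j for j in range(100, len(chunk)) if chunk.startswith(delimiters, j)), len(chunk))
def pvBScan (cs : List Char) (j : Nat) : Nat :=
  if h : j < cs.length then
    if pvStartsAny cs j then j else pvBScan cs (j + 1)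
  else cs.length
termination_by cs.length - j

def pvBLoop (content : String) : List String → Option String
  | [] => none
  | m :: rest =>
    let idx := PySem.Str.find content m
    if idx ≠ -1 then
      let chunk := PySem.Str.slice content (some idx) none
      let e := pvBScan chunk.toList 100
      some (PySem.Str.strip (PySem.Str.slice chunk none (some (e : Int))))
    else pvBLoop content rest

def extract_holmes_section_py_alt (content : String) : Option String :=
  pvBLoop content ["HOLMES DAILY DOSSIER", "## Holmes", "Holmes Daily"]

-- ===== PRECONDITION & SPEC =====
def Spec_extract_holmes_section_py (content : String) (out : Option String) : Prop := out = extract_holmes_section_py_alt content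
instance (content : String) (out : Option String) : Decidable (Spec_extract_holmes_section_py content out) := by unfold Spec_extract_holmes_section_py; infer_instance

-- ===== CLAIM (what is proved, stated in full; the proofs are below) =====
def Claim_equal_extract_holmes_section_py : Prop := ∀ (content : String), Dom_extract_holmes_section_py content → Spec_extract_holmes_section_py content (extract_holmes_section_py content)

-- ===== LEMMAS AND PROOFS =====

-- "some delimiter starts at position k"
def pvHit (cs : List Char) (k : Nat) : Prop :=
  "\n\n---".toList <+: cs.drop k ∨ "\n## ".toList <+: cs.drop k ∨ "\n# ".toList <+: cs.drop k

theorem pvStartsAny_iff (cs : List Char) (j : Nat) : pvStartsAny cs j = true ↔ pvHit cs j := by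
  simp [pvStartsAny, pvHit, PySem.Chars.startswith_iff, or_assoc]

theorem pvBScan_spec (cs : List Char) (j : Nat) :
    pvBScan cs j ≤ cs.length ∧
    (pvBScan cs j < cs.length → j ≤ pvBScan cs j ∧ pvHit cs (pvBScan cs j)) ∧
    (∀ k, j ≤ k → k < pvBScan cs j → ¬ pvHit cs k) := by
  suffices h : ∀ fuel j, cs.length - j ≤ fuel →
      pvBScan cs j ≤ cs.length ∧
      (pvBScan cs j < cs.length → j ≤ pvBScan cs j ∧ pvHit cs (pvBScan cs j)) ∧
      (∀ k, j ≤ k → k < pvBScan cs j → ¬ pvHit cs k) from h _ j le_rfl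
  intro fuel
  induction fuel with
  | zero =>
    intro j hj
    rw [pvBScan, dif_neg (by omega)]
    refine ⟨le_rfl, by omega, fun k hk1 hk2 => by omega⟩
  | succ f ih =>
    intro j hj
    rw [pvBScan]
    by_cases hlt : j < cs.length
    · rw [dif_pos hlt]
      by_cases hs : pvStartsAny cs j = true
      · rw [if_pos hs]
        exact ⟨le_of_lt hlt, fun _ => ⟨le_rfl, (pvStartsAny_iff cs j).mp hs⟩,
          fun k hk1 hk2 => by omega⟩
      · rw [if_neg hs]
        obtain ⟨h1, h2, h3⟩ := ih (j + 1) (by omega)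
        refine ⟨h1, fun hr => ⟨by omega, (h2 hr).2⟩, fun k hk1 hk2 => ?_⟩
        rcases eq_or_lt_of_le hk1 with hkj | hkj
        · subst hkj
          exact fun hhit => hs ((pvStartsAny_iff _ _).mpr hhit)
        · exact h3 k hkj hk2
    · rw [dif_neg hlt]
      exact ⟨le_rfl, by omega, fun k hk1 hk2 => by omega⟩

-- one step of A's delimiter loop
def pvStep (cs : List Char) (e : Int) (d : List Char) : Int :=
  let pos := PySem.Chars.findFrom cs d 100
  if pos ≠ -1 ∧ pos < e then pos else e

theorem pvPrefix_infix_drop100 (cs d : List Char) (k : Nat) (hk : 100 ≤ k)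
    (h : d <+: cs.drop k) : d <:+: cs.drop 100 := by
  have hdd : cs.drop k = (cs.drop 100).drop (k - 100) := by
    rw [List.drop_drop]; congr 1; omega
  exact List.IsInfix.trans (hdd ▸ h).isInfix (List.drop_suffix _ _).isInfix

theorem pvFoldA_spec (cs : List Char) (h100 : 100 ≤ cs.length) :
    ∀ (ds : List (List Char)), (∀ d ∈ ds, d ≠ []) → ∀ (acc : Nat), 100 ≤ acc → acc ≤ cs.length →
    ∃ r : Nat, ds.foldl (pvStep cs) (acc : Int) = (r : Int) ∧ 100 ≤ r ∧ r ≤ acc ∧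
      (r < acc → ∃ d ∈ ds, d <+: cs.drop r) ∧
      (∀ k, 100 ≤ k → k < r → ∀ d ∈ ds, ¬ d <+: cs.drop k) := by
  intro ds
  induction ds with
  | nil =>
    intro _ acc h1 h2
    exact ⟨acc, rfl, h1, le_rfl, by omega, by simp⟩
  | cons d ds ih =>
    intro hne acc h1 h2
    have hd : d ≠ [] := hne d (by simp)
    have hcast : ((100 : Nat) : Int) = (100 : Int) := by norm_num
    by_cases hp : PySem.Chars.findFrom cs d 100 = -1
    · -- d never occurs at or after 100
      have hnin : ¬ d <:+: cs.drop 100 := by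
        have := (PySem.Chars.findFrom_natCast_eq_neg_one_iff cs d 100 h100)
        rw [hcast] at this
        exact this.mp hp
      have hstep : pvStep cs (acc : Int) d = (acc : Int) := by
        simp [pvStep, hp]
      obtain ⟨r, hr, hr1, hr2, hr3, hr4⟩ := ih (fun d' hd' => hne d' (by simp [hd'])) acc h1 h2
      refine ⟨r, by simpa [List.foldl, hstep] using hr, hr1, hr2, ?_, ?_⟩
      · intro hlt; obtain ⟨d', hd', hpre⟩ := hr3 hlt; exact ⟨d', by simp [hd'], hpre⟩
      · intro k hk1 hk2 d' hd'
        rcases List.mem_cons.mp hd' with rfl | hd'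
        · exact fun hpre => hnin (pvPrefix_infix_drop100 cs d' k hk1 hpre)
        · exact hr4 k hk1 hk2 d' hd'
    · -- d occurs; p := first occurrence ≥ 100
      obtain ⟨hp1, hp2, hp3⟩ := PySem.Chars.findFrom_natCast_spec cs d 100 h100 (by rw [hcast]; exact hp)
      rw [hcast] at hp1 hp2 hp3
      set p := PySem.Chars.findFrom cs d 100 with hpdef
      have hp0 : (0:Int) ≤ p := by omega
      have hpn : p = ((p.toNat : Nat) : Int) := by omega
      by_cases hlt : p < (acc : Int)
      · -- take p
        have hstep : pvStep cs (acc : Int) d = p := by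
          simp [pvStep, ← hpdef, hp, hlt]
        have hptoNat1 : 100 ≤ p.toNat := by omega
        have hptoNat2 : p.toNat ≤ cs.length := by
          by_contra hgt
          rw [not_le] at hgt
          have hnil : cs.drop p.toNat = [] := List.drop_eq_nil_of_le (by omega)
          rw [hnil] at hp2
          exact hd (List.prefix_nil.mp hp2)
        obtain ⟨r, hr, hr1, hr2, hr3, hr4⟩ := ih (fun d' hd' => hne d' (by simp [hd'])) p.toNat hptoNat1 hptoNat2
        refine ⟨r, ?_, hr1, by omega, ?_, ?_⟩
        · rw [List.foldl, hstep, hpn]; exact hr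
        · intro _
          rcases lt_or_eq_of_le hr2 with hlt2 | heq
          · obtain ⟨d', hd', hpre⟩ := hr3 hlt2; exact ⟨d', by simp [hd'], hpre⟩
          · exact ⟨d, by simp, heq ▸ hp2⟩
        · intro k hk1 hk2 d' hd'
          rcases List.mem_cons.mp hd' with rfl | hd'
          · exact hp3 k hk1 (by omega)
          · exact hr4 k hk1 hk2 d' hd'
      · -- keep acc; but then no occurrence of d below acc either
        have hstep : pvStep cs (acc : Int) d = (acc : Int) := by
          simp [pvStep, ← hpdef, hlt]
        obtain ⟨r, hr, hr1, hr2, hr3, hr4⟩ := ih (fun d' hd' => hne d' (by simp [hd'])) acc h1 h2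
        refine ⟨r, by simpa [List.foldl, hstep] using hr, hr1, hr2, ?_, ?_⟩
        · intro hlt2; obtain ⟨d', hd', hpre⟩ := hr3 hlt2; exact ⟨d', by simp [hd'], hpre⟩
        · intro k hk1 hk2 d' hd'
          rcases List.mem_cons.mp hd' with rfl | hd'
          · exact hp3 k hk1 (by omega)
          · exact hr4 k hk1 hk2 d' hd'

theorem pvFindFrom_past (cs d : List Char) (h : cs.length < 100) :
    PySem.Chars.findFrom cs d 100 = -1 := by
  rw [PySem.Chars.findFrom]
  simp only []
  rw [if_pos (by push_cast; omega)]

theorem pvHit_iff (cs : List Char) (k : Nat) :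
    pvHit cs k ↔ ∃ d ∈ ["\n\n---".toList, "\n## ".toList, "\n# ".toList], d <+: cs.drop k := by
  simp [pvHit]

theorem pvEnd_eq (cs : List Char) :
    List.foldl (pvStep cs) ((cs.length : Nat) : Int)
        ["\n\n---".toList, "\n## ".toList, "\n# ".toList] = ((pvBScan cs 100 : Nat) : Int) := by
  by_cases h100 : 100 ≤ cs.length
  · obtain ⟨r, hr, hr1, hr2, hr3, hr4⟩ :=
      pvFoldA_spec cs h100 ["\n\n---".toList, "\n## ".toList, "\n# ".toList]
        (by decide) cs.length h100 le_rfl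
    obtain ⟨b1, b2, b3⟩ := pvBScan_spec cs 100
    rw [hr]
    congr 1
    rcases lt_trichotomy r (pvBScan cs 100) with h | h | h
    · exfalso
      have hrn : r < cs.length := by omega
      obtain ⟨d, hd, hpre⟩ := hr3 hrn
      exact b3 r hr1 h ((pvHit_iff cs r).mpr ⟨d, hd, hpre⟩)
    · exact h
    · exfalso
      have hrb : pvBScan cs 100 < cs.length := by omega
      obtain ⟨hb100, hbhit⟩ := b2 hrb
      obtain ⟨d, hd, hpre⟩ := (pvHit_iff cs (pvBScan cs 100)).mp hbhit
      exact hr4 (pvBScan cs 100) hb100 h d hd hpre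
  · have hstep : ∀ d : List Char, ∀ e : Int, pvStep cs e d = e := by
      intro d e
      simp [pvStep, pvFindFrom_past cs d (by omega)]
    rw [pvBScan, dif_neg (by omega)]
    simp [List.foldl, hstep]

theorem pvInner_eq (chunk : String) :
    pvAInner chunk =
      PySem.Str.strip (PySem.Str.slice chunk none (some ((pvBScan chunk.toList 100 : Nat) : Int))) := by
  have h := pvEnd_eq chunk.toList
  simp only [List.foldl, pvStep] at h
  unfold pvAInner
  simp only [pvDelims, List.foldl, PySem.Str.findFrom_eq, PySem.Str.len_eq]
  rw [h]

-- ===== VERDICT (by name: the statement is the Claim_ definition above) =====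
theorem extract_holmes_section_py_spec : Claim_equal_extract_holmes_section_py := by
  intro content _
  unfold Spec_extract_holmes_section_py extract_holmes_section_py extract_holmes_section_py_alt
  by_cases h : content = ""
  · subst h; simp; decide
  · simp only [if_neg h, pvMarkers, pvALoop, pvBLoop]
    split_ifs <;> simp [pvInner_eq]
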